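-- pv_equiv track=rewrite | github.com/viaacode/visual-name-authority-project | scripts/get_data/extract_rights_wikitext.py | choose_language_text
-- ===== SOURCE A (Python) =====
-- PREFERRED_LANGS = ('nl', 'en')     # preferred languages for multi-language metadata fields
--
-- def choose_language_text(lang_hits: list[tuple[str]], preferred=PREFERRED_LANGS) -> str | None:
--     """If there are multilanguage values, choose the language that is preferred"""
--     if not lang_hits:
--         return None
--
--     for pref in preferred:
--         for lang_code, text in lang_hits:
--             if lang_code == pref and text:
--                 return text
--
--     for _, text in lang_hits:
--         if text:
--             return text
--
--     return None
-- ===== SOURCE B (Python) =====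
-- PREFERRED_LANGS = ('nl', 'en')
--
--
-- def choose_language_text(lang_hits: list[tuple[str]], preferred=PREFERRED_LANGS) -> str | None:
--     """Single pass: index the first truthy text per language, then look up the preferred codes."""
--     if not lang_hits:
--         return None
--     best = {}
--     fallback = None
--     for lang_code, text in lang_hits:
--         if text:
--             if lang_code not in best:
--                 best[lang_code] = text
--             if fallback is None:
--                 fallback = text
--     for pref in preferred:
--         if pref in best:
--             return best[pref]
--     return fallback
-- ===== Notes on version B (the rewrite author's own statement) =====
-- stated objective: faster
-- what changed: B replaces A's nested scans (one full pass over lang_hits per preferred code, plus a fallback pass) by a single pass that builds a dict of the first truthy text per language and records the first truthy text overall, followed by O(1)-per-code lookups over preferred.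
import Mathlib
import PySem

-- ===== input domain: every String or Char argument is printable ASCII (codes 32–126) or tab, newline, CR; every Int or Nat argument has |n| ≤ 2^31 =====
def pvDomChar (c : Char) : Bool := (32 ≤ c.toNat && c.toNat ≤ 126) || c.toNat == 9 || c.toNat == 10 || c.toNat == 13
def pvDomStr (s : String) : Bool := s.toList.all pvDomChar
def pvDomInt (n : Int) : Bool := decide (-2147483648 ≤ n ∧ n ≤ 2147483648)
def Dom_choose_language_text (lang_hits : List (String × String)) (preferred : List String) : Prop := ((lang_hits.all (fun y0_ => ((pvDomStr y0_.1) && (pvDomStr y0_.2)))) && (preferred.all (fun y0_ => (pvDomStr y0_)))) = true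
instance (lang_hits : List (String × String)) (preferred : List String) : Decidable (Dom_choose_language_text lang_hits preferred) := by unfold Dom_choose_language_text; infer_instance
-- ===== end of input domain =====

-- B replaces A's nested scans by one indexing pass over lang_hits plus lookups over preferred; same return value.

-- ===== PORT A =====
-- inner 'for lang_code, text in lang_hits: if lang_code == pref and text: return text'
def cltInner (lang_hits : List (String × String)) (pref : String) : Option String :=
  match lang_hits with
  | [] => none
  | (lang_code, text) :: rest =>
      if lang_code = pref ∧ text ≠ "" then some text else cltInner rest pref

-- outer 'for pref in preferred'
def cltOuter (preferred : List String) (lang_hits : List (String × String)) : Option String :=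
  match preferred with
  | [] => none
  | pref :: rest =>
      match cltInner lang_hits pref with
      | some text => some text
      | none => cltOuter rest lang_hits

-- final 'for _, text in lang_hits: if text: return text'
def cltFallbackScan (lang_hits : List (String × String)) : Option String :=
  match lang_hits with
  | [] => none
  | (_, text) :: rest => if text ≠ "" then some text else cltFallbackScan rest

def choose_language_text (lang_hits : List (String × String)) (preferred : List String) : Option String :=
  if lang_hits = [] then none
  else
    match cltOuter preferred lang_hits with
    | some text => some text
    | none => cltFallbackScan lang_hits

-- ===== PORT B =====
-- one indexing pass: best = first truthy text per lang_code; fallback = first truthy text overall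
def altStep (st : PySem.Dict String String × Option String) (hit : String × String) :
    PySem.Dict String String × Option String :=
  if hit.2 ≠ "" then
    ((if st.1.contains hit.1 = false then st.1.insert hit.1 hit.2 else st.1),
     (if st.2 = none then some hit.2 else st.2))
  else st

-- 'for pref in preferred: if pref in best: return best[pref]'
def altLookup (preferred : List String) (best : PySem.Dict String String) : Option String :=
  match preferred with
  | [] => none
  | pref :: rest =>
      if best.contains pref then best.get? pref else altLookup rest best

def choose_language_text_alt (lang_hits : List (String × String)) (preferred : List String) : Option String :=
  if lang_hits = [] then none
  else
    let st := lang_hits.foldl altStep (PySem.Dict.empty, none)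
    match altLookup preferred st.1 with
    | some text => some text
    | none => st.2

-- ===== PRECONDITION & SPEC =====
def Spec_choose_language_text (lang_hits : List (String × String)) (preferred : List String) (out : Option String) : Prop := out = choose_language_text_alt lang_hits preferred
instance (lang_hits : List (String × String)) (preferred : List String) (out : Option String) : Decidable (Spec_choose_language_text lang_hits preferred out) := by unfold Spec_choose_language_text; infer_instance

-- ===== CLAIM (what is proved, stated in full; the proofs are below) =====
def Claim_equal_choose_language_text : Prop := ∀ (lang_hits : List (String × String)) (preferred : List String), Dom_choose_language_text lang_hits preferred → Spec_choose_language_text lang_hits preferred (choose_language_text lang_hits preferred)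

-- ===== LEMMAS AND PROOFS =====

-- the dict component of the fold answers lookups like A's inner scan (seeded lookups win)
theorem altFold_get? (lang_hits : List (String × String))
    (d : PySem.Dict String String) (fb : Option String) (p : String) :
    ((lang_hits.foldl altStep (d, fb)).1).get? p =
      match d.get? p with
      | some t => some t
      | none => cltInner lang_hits p := by
  induction lang_hits generalizing d fb with
  | nil => cases h : d.get? p <;> simp [h, cltInner]
  | cons hit rest ih =>
    obtain ⟨lc, t⟩ := hit
    by_cases ht : t ≠ ""
    · simp only [List.foldl_cons, altStep, ht, if_pos, ne_eq, not_false_iff]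
      by_cases hc : d.contains lc = false
      · simp only [ht, hc, if_true, ite_true, ite_false, if_false, reduceIte, ih]
        by_cases hp : p = lc
        · subst hp
          have h0 : d.get? p = none := by
            rw [PySem.Dict.get?_eq_none_iff_contains]; exact hc
          simp [h0, ht, PySem.Dict.get?_insert_self, cltInner]
        · have hp2 : ¬ lc = p := fun e => hp e.symm
          rw [PySem.Dict.get?_insert]
          cases h : d.get? p <;> simp [h, cltInner, hp, hp2, ht]
      · replace hc : d.contains lc = true := by simpa using hc
        simp only [hc, Bool.true_eq_false, if_false, reduceIte, ih]
        cases h : d.get? p with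
        | some v => simp [h]
        | none =>
          have hp : ¬ p = lc := by
            intro e; subst e
            rw [PySem.Dict.get?_eq_none_iff_contains] at h
            rw [h] at hc; exact Bool.false_ne_true hc
          have hp2 : ¬ lc = p := fun e => hp e.symm
          simp [h, cltInner, hp2]
    · simp only [ne_eq, not_not] at ht
      simp only [List.foldl_cons, altStep, ht, ne_eq, not_true_eq_false, if_false, reduceIte, ih]
      cases h : d.get? p <;> simp [h, cltInner, ht]

-- the fallback component of the fold is A's final scan (a seeded fallback wins)
theorem altFold_snd (lang_hits : List (String × String))
    (d : PySem.Dict String String) (fb : Option String) :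
    (lang_hits.foldl altStep (d, fb)).2 =
      match fb with
      | some t => some t
      | none => cltFallbackScan lang_hits := by
  induction lang_hits generalizing d fb with
  | nil => cases fb <;> simp [cltFallbackScan]
  | cons hit rest ih =>
    obtain ⟨lc, t⟩ := hit
    by_cases ht : t ≠ ""
    · simp only [List.foldl_cons, altStep, ht, ne_eq, not_false_iff, if_pos, reduceIte]
      cases fb with
      | some v => simp [ih, ht]
      | none => simp [ih, ht, cltFallbackScan]
    · simp only [ne_eq, not_not] at ht
      simp only [List.foldl_cons, altStep, ht, ne_eq, not_true_eq_false, if_false, reduceIte, ih]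
      cases fb <;> simp [cltFallbackScan, ht]

-- B's lookup loop over preferred equals A's outer nested scan
theorem altLookup_eq_cltOuter (preferred : List String) (lang_hits : List (String × String)) :
    altLookup preferred (lang_hits.foldl altStep (PySem.Dict.empty, none)).1 =
      cltOuter preferred lang_hits := by
  induction preferred with
  | nil => simp [altLookup, cltOuter]
  | cons pref rest ih =>
    simp only [altLookup, cltOuter, ih]
    have hg := altFold_get? lang_hits PySem.Dict.empty none pref
    simp only [PySem.Dict.get?_empty] at hg
    by_cases hc : ((lang_hits.foldl altStep (PySem.Dict.empty, none)).1).contains pref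
    · rw [if_pos hc, hg]
      cases h : cltInner lang_hits pref with
      | some v => simp
      | none =>
        exfalso
        rw [PySem.Dict.contains_eq_isSome_get?, hg, h] at hc
        simp at hc
    · rw [if_neg hc]
      rw [PySem.Dict.contains_eq_isSome_get?, hg] at hc
      cases h : cltInner lang_hits pref with
      | some v => rw [h] at hc; simp at hc
      | none => simp

-- ===== VERDICT (by name: the statement is the Claim_ definition above) =====
theorem choose_language_text_spec : Claim_equal_choose_language_text := by
  intro lang_hits preferred _
  unfold Spec_choose_language_text choose_language_text choose_language_text_alt
  by_cases hnil : lang_hits = []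
  · simp [hnil]
  · simp only [hnil, if_neg, if_false]
    rw [altLookup_eq_cltOuter]
    cases h : cltOuter preferred lang_hits with
    | some v => simp
    | none =>
      simp only
      rw [altFold_snd]
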